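-- pv_equiv track=rewrite | github.com/prateeekgoel7248/Python-1 | amazing array.py | solve
-- ===== SOURCE A (Python) =====
-- def solve(A):
--     def vowel(v):
--         if v=='a' or  v=='e' or v=='i' or v=='o' or v=='u' or v=="A" or v=="E" or v=='I' or v=="O" or v=="U":
--             return True
--         else:
--             return False
--     s=0
--     for i in range(len(A)):
--         if vowel(A[i]):
--             s=s+(len(A)-i)
--     return s%10003
-- ===== SOURCE B (Python) =====
-- def solve(A):
--     vowels = set("aeiouAEIOU")
--     cnt = 0
--     s = 0
--     for c in A:
--         if c in vowels:
--             cnt += 1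
--         s += cnt
--     return s % 10003
-- ===== Notes on version B (the rewrite author's own statement) =====
-- stated objective: faster
-- what changed: Replaces the index loop that adds (len-i) at each vowel with a single left-to-right pass maintaining a running vowel count added at every position (sum-reordering identity), using a set membership test instead of a 10-way comparison helper and no per-vowel length/index arithmetic.
import Mathlib
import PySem

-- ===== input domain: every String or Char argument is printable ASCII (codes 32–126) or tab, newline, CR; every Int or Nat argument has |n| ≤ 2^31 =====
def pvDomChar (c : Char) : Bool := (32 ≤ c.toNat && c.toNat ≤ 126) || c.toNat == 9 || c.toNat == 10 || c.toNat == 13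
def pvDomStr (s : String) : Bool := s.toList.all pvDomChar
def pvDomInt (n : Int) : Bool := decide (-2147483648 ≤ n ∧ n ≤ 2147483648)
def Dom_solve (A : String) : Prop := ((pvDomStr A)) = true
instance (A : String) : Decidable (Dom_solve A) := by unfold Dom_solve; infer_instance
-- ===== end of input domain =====

-- B replaces A's per-vowel (len-i) contributions by a running prefix vowel count added at every position; same O(n) cost.

-- ===== PORT A =====
-- A's inner helper `vowel`, same comparisons in the same order
def pvVowel (v : Char) : Bool :=
  v == 'a' || v == 'e' || v == 'i' || v == 'o' || v == 'u' ||
  v == 'A' || v == 'E' || v == 'I' || v == 'O' || v == 'U'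

-- loop over range(len(A)); A[i] is always in range, so getD is exact here
def solve (A : String) : Int :=
  let l := A.toList
  let s : Int := (List.range l.length).foldl
    (fun s i => if pvVowel (l.getD i ' ') then s + ((l.length : Int) - (i : Int)) else s) 0
  PySem.Int.mod s 10003

-- ===== PORT B =====
def solve_alt (A : String) : Int :=
  let p : Int × Int := A.toList.foldl
    (fun p c =>
      let cnt := if pvVowel c then p.1 + 1 else p.1
      (cnt, p.2 + cnt)) (0, 0)
  PySem.Int.mod p.2 10003

-- ===== PRECONDITION & SPEC =====
def Spec_solve (A : String) (out : Int) : Prop := out = solve_alt A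
instance (A : String) (out : Int) : Decidable (Spec_solve A out) := by unfold Spec_solve; infer_instance

-- ===== CLAIM (what is proved, stated in full; the proofs are below) =====
def Claim_equal_solve : Prop := ∀ (A : String), Dom_solve A → Spec_solve A (solve A)

-- ===== LEMMAS AND PROOFS =====

-- recursive characterisation of A's sum: each vowel at the head contributes the full length
def pvSumA : List Char → Int
  | [] => 0
  | c :: t => (if pvVowel c then ((t.length : Int) + 1) else 0) + pvSumA t

lemma pvFoldA_eq (l : List Char) (s : Int) :
    (List.range l.length).foldl
      (fun s i => if pvVowel (l.getD i ' ') then s + ((l.length : Int) - (i : Int)) else s) s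
      = s + pvSumA l := by
  induction l generalizing s with
  | nil => simp [pvSumA]
  | cons c t ih =>
    have hmap :
        (fun (s : Int) (i : ℕ) =>
            if pvVowel ((c :: t).getD (i+1) ' ') then s + (((c :: t).length : Int) - ((i+1 : ℕ) : Int)) else s)
          = (fun s i => if pvVowel (t.getD i ' ') then s + ((t.length : Int) - (i : Int)) else s) := by
      funext s i
      simp only [List.getD_cons_succ, List.length_cons]
      push_cast
      ring_nf
    calc (List.range (c :: t).length).foldl
          (fun s i => if pvVowel ((c :: t).getD i ' ') then s + (((c :: t).length : Int) - (i : Int)) else s) s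
        = ((List.range t.length).map Nat.succ).foldl
          (fun s i => if pvVowel ((c :: t).getD i ' ') then s + (((c :: t).length : Int) - (i : Int)) else s)
          (if pvVowel c then s + (((c :: t).length : Int) - (0 : Int)) else s) := by
          rw [List.length_cons, List.range_succ_eq_map]
          simp
      _ = (List.range t.length).foldl
          (fun s i => if pvVowel (t.getD i ' ') then s + ((t.length : Int) - (i : Int)) else s)
          (if pvVowel c then s + (((c :: t).length : Int) - (0 : Int)) else s) := by
          rw [List.foldl_map]
          exact congrFun (congrFun (congrArg _ hmap) _) _
      _ = s + pvSumA (c :: t) := by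
          rw [ih]
          simp only [pvSumA, List.length_cons]
          split_ifs <;> push_cast <;> ring

-- B's fold: final s is the start s, plus cnt once per remaining position, plus the cnt=0 sum pvSumA
lemma pvFoldB_eq (l : List Char) (cnt s : Int) :
    (l.foldl (fun p c =>
        let cnt := if pvVowel c then p.1 + 1 else p.1
        (cnt, p.2 + cnt)) (cnt, s)).2
      = s + cnt * (l.length : Int) + pvSumA l := by
  induction l generalizing cnt s with
  | nil => simp [pvSumA]
  | cons c t ih =>
    simp only [List.foldl_cons, pvSumA, List.length_cons]
    rw [ih]
    split_ifs <;> push_cast <;> ring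

-- ===== VERDICT (by name: the statement is the Claim_ definition above) =====
theorem solve_spec : Claim_equal_solve := by
  intro A _
  show solve A = solve_alt A
  simp only [solve, solve_alt]
  rw [pvFoldA_eq, pvFoldB_eq]
  ring_nf
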